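-- pv_equiv track=rewrite | github.com/DominicMonares/spp-extras | api/src/spp_extras_api/utils/achievements.py | format_ach_rewards
-- ===== SOURCE A (Python) =====
-- def format_ach_rewards(achievements):
--     all = {}
--     for a in achievements:
--         # Store in arrays b/c of Matron/Patron duplicate
--         entry = str(a['entry'])
--         if entry not in all:
--             all[entry] = [a]
--         else:
--             all[entry].append(a)
--
--     return all
-- ===== SOURCE B (Python) =====
-- def format_ach_rewards(achievements):
--     # Two-pass decomposition: first collect the distinct stringified entries in
--     # first-occurrence order, then build each group with one filter pass.
--     keys = []
--     for a in achievements: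
--         k = str(a['entry'])
--         if k not in keys:
--             keys.append(k)
--     return {k: [a for a in achievements if str(a['entry']) == k] for k in keys}
-- ===== Notes on version B (the rewrite author's own statement) =====
-- stated objective: alternative
-- what changed: A builds the groups in one incremental pass over a dict (insert-or-append per element); B first collects the distinct stringified entries in first-occurrence order and then materialises each group by filtering the whole list per key (a dict comprehension), trading the single hashing pass for a keys-then-filter decomposition.
import Mathlib
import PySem

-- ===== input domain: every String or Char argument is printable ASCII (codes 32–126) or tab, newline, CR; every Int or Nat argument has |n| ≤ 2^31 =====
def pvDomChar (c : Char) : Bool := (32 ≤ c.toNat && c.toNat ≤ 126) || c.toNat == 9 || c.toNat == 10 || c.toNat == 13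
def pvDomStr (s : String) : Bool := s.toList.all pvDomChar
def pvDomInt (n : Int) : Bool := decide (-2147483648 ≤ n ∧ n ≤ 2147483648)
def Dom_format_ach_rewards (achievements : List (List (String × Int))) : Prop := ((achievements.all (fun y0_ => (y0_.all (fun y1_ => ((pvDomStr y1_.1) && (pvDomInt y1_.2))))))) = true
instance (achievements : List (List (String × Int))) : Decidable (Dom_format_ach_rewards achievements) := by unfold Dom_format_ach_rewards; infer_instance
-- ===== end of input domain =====

-- B replaces A's single incremental dict pass by a keys-then-filter decomposition (alternative, same result).
-- Pre_ excludes inputs where some achievement lacks the "entry" key, on which both Pythons raise KeyError.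


-- str(a['entry']); the dict a is an association list. Outside Pre_ (key absent, Python raises
-- KeyError) the 0 default is a total stand-in; Pre_ guarantees the lookup succeeds.
def pvKey (a : List (String × Int)) : String :=
  PySem.Int.toStr ((PySem.Dict.mk a).getD "entry" 0)

-- ===== PORT A =====
def format_ach_rewards (achievements : List (List (String × Int))) : List (String × List (List (String × Int))) :=
  (achievements.foldl
    (fun all a =>
      let entry := pvKey a
      if all.contains entry = false then all.insert entry [a]
      else all.modify entry [] (· ++ [a]))
    (PySem.Dict.empty : PySem.Dict String (List (List (String × Int))))).items

-- ===== PORT B =====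
def format_ach_rewards_alt (achievements : List (List (String × Int))) : List (String × List (List (String × Int))) :=
  let keys : PySem.Set String :=
    achievements.foldl (fun ks a => PySem.Set.add ks (pvKey a)) []
  keys.map (fun k => (k, achievements.filter (fun a => pvKey a == k)))

-- ===== PRECONDITION & SPEC =====
-- Pre_ excludes inputs where some achievement dict has no "entry" key: there both A and B raise KeyError.
def Pre_format_ach_rewards (achievements : List (List (String × Int))) : Prop :=
  (achievements.all (fun a => (PySem.Dict.mk a).contains "entry")) = true
instance (achievements : List (List (String × Int))) : Decidable (Pre_format_ach_rewards achievements) := by unfold Pre_format_ach_rewards; infer_instance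
def pvWitness_format_ach_rewards : (List (List (String × Int))) :=
  [[("entry", 7), ("points", 1)], [("entry", 7), ("points", 2)], [("entry", 3)]]
def Spec_format_ach_rewards (achievements : List (List (String × Int))) (out : List (String × List (List (String × Int)))) : Prop := out = format_ach_rewards_alt achievements
instance (achievements : List (List (String × Int))) (out : List (String × List (List (String × Int)))) : Decidable (Spec_format_ach_rewards achievements out) := by unfold Spec_format_ach_rewards; infer_instance

-- ===== CLAIM (what is proved, stated in full; the proofs are below) =====
def Claim_equal_format_ach_rewards : Prop := ∀ (achievements : List (List (String × Int))), Dom_format_ach_rewards achievements → Pre_format_ach_rewards achievements → Spec_format_ach_rewards achievements (format_ach_rewards achievements)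

-- ===== LEMMAS AND PROOFS =====

-- A's branch (insert a fresh singleton / append to the existing list) is pointwise the
-- single dict-grouping step 'modify key [] (· ++ [a])'.
theorem pvStep_eq (all : PySem.Dict String (List (List (String × Int)))) (a : List (String × Int)) :
    (if all.contains (pvKey a) = false then all.insert (pvKey a) [a]
     else all.modify (pvKey a) [] (· ++ [a]))
      = all.modify (pvKey a) [] (· ++ [a]) := by
  by_cases h : all.contains (pvKey a) = false
  · simp only [h, if_true, PySem.Dict.modify, PySem.Dict.getD_of_not_contains _ _ h]
    rfl
  · simp [h]

-- The grouping fold, characterised: its items are the distinct keys in first-occurrence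
-- order, each paired with the filter of the input at that key.
theorem pvFold_items (achievements : List (List (String × Int))) :
    (achievements.foldl (fun all a => all.modify (pvKey a) [] (· ++ [a]))
      (PySem.Dict.empty : PySem.Dict String (List (List (String × Int))))).items
      = (PySem.Set.ofList (achievements.map pvKey)).map
          (fun k => (k, achievements.filter (fun a => pvKey a == k))) := by
  set F := achievements.foldl (fun all a => all.modify (pvKey a) [] (· ++ [a]))
      (PySem.Dict.empty : PySem.Dict String (List (List (String × Int)))) with hF
  have hkeys : F.keys = PySem.Set.ofList (achievements.map pvKey) := by
    rw [hF, PySem.Dict.keys_foldl_modify_key, PySem.Dict.keys_empty,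
      PySem.Set.update_nil_left]
  have hnd : F.keys.Nodup := by rw [hkeys]; exact PySem.Set.nodup_ofList _
  have hget : ∀ k, F.getD k [] = achievements.filter (fun a => pvKey a == k) := by
    intro k
    have hmap : F = (achievements.map (fun a => (pvKey a, a))).foldl
        (fun d p => d.modify p.1 [] (· ++ [p.2])) PySem.Dict.empty := by
      rw [hF, List.foldl_map]
    rw [hmap, PySem.Dict.getD_foldl_modify_append, PySem.Dict.getD_empty,
      List.filter_map, List.map_map]
    simp [Function.comp_def]
  rw [PySem.Dict.items_eq_map_keys F hnd [], hkeys]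
  exact List.map_congr_left (fun k _ => by rw [hget k])

theorem format_ach_rewards_eq (achievements : List (List (String × Int))) :
    format_ach_rewards achievements = format_ach_rewards_alt achievements := by
  unfold format_ach_rewards format_ach_rewards_alt
  simp only [pvStep_eq, pvFold_items]
  rw [← PySem.Set.update_map_eq_foldl_add, PySem.Set.update_nil_left]

-- ===== VERDICT (by name: the statement is the Claim_ definition above) =====
theorem format_ach_rewards_spec : Claim_equal_format_ach_rewards := by
  intro achievements _ _
  unfold Spec_format_ach_rewards
  exact format_ach_rewards_eq achievements
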